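-- pv_equiv track=rewrite | github.com/gaftra/AlienDNAChallenge | usefulFunctions.py | getSameCharacters
-- ===== SOURCE A (Python) =====
-- def getSameCharacters(str1, str2):
--
-- 	str3 = str1[:-1]
-- 	str4 = str2[:-1]
--
-- 	if str3 == '' or str4 == '':
-- 		return 1
--
-- 	if str1[-1] == str2[-1]:
-- 			return getSameCharacters(str3,str4) - 1
-- 	else:
-- 			return 1 + getSameCharacters(str3,str4)
-- ===== SOURCE B (Python) =====
-- def getSameCharacters(str1, str2):
--     pairs = list(zip(str1[::-1], str2[::-1]))[:-1]
--     return 1 + sum(-1 if a == b else 1 for a, b in pairs)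
-- ===== Notes on version B (the rewrite author's own statement) =====
-- stated objective: faster
-- what changed: Replaces A's O(n^2) recursion (each step reslices both strings and recurses on the prefixes) with a single O(n) pass: zip the two reversed strings, drop the last pair, and sum -1 per matching pair and +1 per mismatch, plus the base score 1.
import Mathlib
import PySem

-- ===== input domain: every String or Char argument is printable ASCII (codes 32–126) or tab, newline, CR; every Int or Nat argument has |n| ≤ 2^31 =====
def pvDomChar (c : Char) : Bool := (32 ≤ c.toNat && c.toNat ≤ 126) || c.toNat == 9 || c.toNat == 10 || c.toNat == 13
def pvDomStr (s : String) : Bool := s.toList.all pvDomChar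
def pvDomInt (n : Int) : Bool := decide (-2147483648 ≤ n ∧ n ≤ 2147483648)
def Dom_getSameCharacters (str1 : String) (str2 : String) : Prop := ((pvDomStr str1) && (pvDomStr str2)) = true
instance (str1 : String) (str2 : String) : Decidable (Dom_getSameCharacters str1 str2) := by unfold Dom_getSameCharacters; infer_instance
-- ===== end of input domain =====

-- B replaces A's recursion-with-slicing by one pass over the zipped reversed strings (different algorithm; a timing run measures the speed difference).

-- ===== PORT A =====
-- A's recursion, transliterated on the List Char side (PySem string ops are wrappers over List Char):
-- str3 = str1[:-1]; str4 = str2[:-1]; if str3 == '' or str4 == '': return 1; compare str1[-1], str2[-1]; recurse.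
def getSameCharactersRec (l1 l2 : List Char) : Int :=
  if PySem.List.slice l1 none (some (-1)) = [] ∨ PySem.List.slice l2 none (some (-1)) = [] then 1
  else if PySem.List.pyGet? l1 (-1) = PySem.List.pyGet? l2 (-1) then
    getSameCharactersRec (PySem.List.slice l1 none (some (-1))) (PySem.List.slice l2 none (some (-1))) - 1
  else
    1 + getSameCharactersRec (PySem.List.slice l1 none (some (-1))) (PySem.List.slice l2 none (some (-1)))
termination_by l1.length
decreasing_by
  all_goals
    simp only [PySem.List.slice_to_neg_one, not_or] at *
    rcases l1 with _ | ⟨a, as⟩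
    · simp_all
    · simp

def getSameCharacters (str1 : String) (str2 : String) : Int :=
  getSameCharactersRec str1.toList str2.toList

-- ===== PORT B =====
-- pairs = list(zip(str1[::-1], str2[::-1]))[:-1]  (s[::-1] is reverse, xs[:-1] is dropLast)
-- return 1 + sum(-1 if a == b else 1 for a, b in pairs)
def getSameCharacters_alt (str1 : String) (str2 : String) : Int :=
  let pairs := (List.zip str1.toList.reverse str2.toList.reverse).dropLast
  1 + (pairs.map (fun p => if p.1 = p.2 then (-1 : Int) else 1)).sum

-- ===== PRECONDITION & SPEC =====
def Spec_getSameCharacters (str1 : String) (str2 : String) (out : Int) : Prop := out = getSameCharacters_alt str1 str2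
instance (str1 : String) (str2 : String) (out : Int) : Decidable (Spec_getSameCharacters str1 str2 out) := by unfold Spec_getSameCharacters; infer_instance

-- ===== CLAIM (what is proved, stated in full; the proofs are below) =====
def Claim_equal_getSameCharacters : Prop := ∀ (str1 : String) (str2 : String), Dom_getSameCharacters str1 str2 → Spec_getSameCharacters str1 str2 (getSameCharacters str1 str2)

-- ===== LEMMAS AND PROOFS =====

-- A's recursion, read on the reversed lists, equals B's sum over the zipped reversed lists.
theorem getSameCharactersRec_eq_sum (r1 r2 : List Char) :
    getSameCharactersRec r1.reverse r2.reverse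
      = 1 + (((List.zip r1 r2).dropLast).map (fun p => if p.1 = p.2 then (-1 : Int) else 1)).sum := by
  induction r1 generalizing r2 with
  | nil => rw [getSameCharactersRec]; simp [PySem.List.slice_to_neg_one]
  | cons a as ih =>
    rcases r2 with _ | ⟨b, bs⟩
    · rw [getSameCharactersRec]; simp [PySem.List.slice_to_neg_one]
    · rw [getSameCharactersRec]
      simp only [List.reverse_cons, PySem.List.slice_to_neg_one, List.dropLast_concat,
        PySem.List.pyGet?_neg_one_append_singleton, List.reverse_eq_nil_iff,
        Option.some.injEq, List.zip_cons_cons]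
      by_cases hbase : as = [] ∨ bs = []
      · have h0 : as.zip bs = [] := by rcases hbase with h | h <;> simp [h]
        rw [if_pos hbase]
        simp [h0]
      · rw [if_neg hbase]
        rw [not_or] at hbase
        have hz : as.zip bs ≠ [] := by simp [List.zip_eq_nil_iff, hbase.1, hbase.2]
        rw [List.dropLast_cons_of_ne_nil hz]
        by_cases hab : a = b
        · simp [hab, ih bs]
        · simp [hab, ih bs]

-- ===== VERDICT (by name: the statement is the Claim_ definition above) =====
theorem getSameCharacters_spec : Claim_equal_getSameCharacters := by
  intro str1 str2 _
  unfold Spec_getSameCharacters getSameCharacters getSameCharacters_alt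
  have h := getSameCharactersRec_eq_sum str1.toList.reverse str2.toList.reverse
  simpa using h
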